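-- pv_equiv track=rewrite | github.com/sarthakBhandari/CodeSignal-Solutions | Crosswords Formation/crosswords_comb.py | crosswordFormation
-- ===== SOURCE A (Python) =====
-- def crosswordFormation(words):
--     from itertools import permutations as perms
--     from collections import defaultdict as ddic
--     ans = 0
--     for p in perms(words):
--         M = ddic(int)
--         a,b,c,d = p
--         for i in range(2, min(len(a),len(b))):
--             for p in range(len(a) - i):
--                 for q in range(len(b) - i):
--                     M[a[p],a[p+i],b[q],b[q+i]] += 1
--         for i in range(2, min(len(c),len(d))):
--             for p in range(len(c) - i):
--                 for q in range(len(d) - i):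
--                     ans += M[c[p],d[q],c[p+i],d[q+i]]
--     return ans
-- ===== SOURCE B (Python) =====
-- def crosswordFormation(words):
--     # Direct brute force: no hash table; for each permutation, six nested loops
--     # over both gaps and all four offsets, counting position tuples whose four
--     # crossing characters match.
--     from itertools import permutations
--     ans = 0
--     for a, b, c, d in permutations(words):
--         for i1 in range(2, min(len(a), len(b))):
--             for pa in range(len(a) - i1):
--                 for qb in range(len(b) - i1):
--                     for i2 in range(2, min(len(c), len(d))):
--                         for pc in range(len(c) - i2):
--                             for qd in range(len(d) - i2):
--                                 if (a[pa] == c[pc] and a[pa + i1] == d[qd]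
--                                         and b[qb] == c[pc + i2] and b[qb + i1] == d[qd + i2]):
--                                     ans += 1
--     return ans
-- ===== Notes on version B (the rewrite author's own statement) =====
-- stated objective: simpler
-- what changed: B drops A's per-permutation defaultdict hash-join entirely and counts formations by direct brute force: six nested loops over both gaps and all four offsets, incrementing when the four crossing characters match; no table is maintained.
import Mathlib
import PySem

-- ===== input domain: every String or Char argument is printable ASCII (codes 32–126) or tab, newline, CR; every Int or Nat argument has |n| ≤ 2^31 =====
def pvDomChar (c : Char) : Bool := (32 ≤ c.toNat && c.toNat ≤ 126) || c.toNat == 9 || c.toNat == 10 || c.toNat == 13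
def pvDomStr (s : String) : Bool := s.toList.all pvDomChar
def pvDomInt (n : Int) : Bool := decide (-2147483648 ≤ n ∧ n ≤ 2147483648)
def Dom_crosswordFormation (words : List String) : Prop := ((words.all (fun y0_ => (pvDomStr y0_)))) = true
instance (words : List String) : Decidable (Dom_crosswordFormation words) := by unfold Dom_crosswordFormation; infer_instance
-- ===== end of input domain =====

-- B replaces A's per-permutation hash-table join by a direct six-deep brute-force
-- count of matching position tuples: simpler (no table), same result, slower per word length.

-- ===== PORT A =====
-- pyGetD is exact here: every index fed to it is nonnegative and in range.
def crosswordFormation (words : List String) : Int :=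
  (PySem.List.permutations words words.length).foldl (fun ans p =>
    match p with
    | [a, b, c, d] =>
      let A := a.toList; let B := b.toList; let C := c.toList; let D := d.toList
      let M : PySem.Dict (Char × Char × Char × Char) Int :=
        (PySem.List.pyRange 2 (min (A.length : Int) (B.length : Int)) 1).foldl (fun M i =>
          (PySem.List.pyRange 0 ((A.length : Int) - i) 1).foldl (fun M p =>
            (PySem.List.pyRange 0 ((B.length : Int) - i) 1).foldl (fun M q =>
              M.modify (PySem.List.pyGetD A p ' ', PySem.List.pyGetD A (p + i) ' ',
                        PySem.List.pyGetD B q ' ', PySem.List.pyGetD B (q + i) ' ')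
                0 (· + 1)) M) M) PySem.Dict.empty
      (PySem.List.pyRange 2 (min (C.length : Int) (D.length : Int)) 1).foldl (fun ans i =>
        (PySem.List.pyRange 0 ((C.length : Int) - i) 1).foldl (fun ans p =>
          (PySem.List.pyRange 0 ((D.length : Int) - i) 1).foldl (fun ans q =>
            ans + M.getD (PySem.List.pyGetD C p ' ', PySem.List.pyGetD D q ' ',
                          PySem.List.pyGetD C (p + i) ' ', PySem.List.pyGetD D (q + i) ' ') 0)
            ans) ans) ans
    | _ => ans) 0

-- ===== PORT B =====
def crosswordFormation_alt (words : List String) : Int :=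
  (PySem.List.permutations words words.length).foldl (fun ans p =>
    -- tuple unpacking a,b,c,d = p, made total by the length guard (outside Pre_ Python raises)
    if p.length == 4 then
      let A := (p.getD 0 "").toList; let B := (p.getD 1 "").toList
      let C := (p.getD 2 "").toList; let D := (p.getD 3 "").toList
      (PySem.List.pyRange 2 (min (A.length : Int) (B.length : Int)) 1).foldl (fun ans i1 =>
        (PySem.List.pyRange 0 ((A.length : Int) - i1) 1).foldl (fun ans pa =>
          (PySem.List.pyRange 0 ((B.length : Int) - i1) 1).foldl (fun ans qb =>
            (PySem.List.pyRange 2 (min (C.length : Int) (D.length : Int)) 1).foldl (fun ans i2 =>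
              (PySem.List.pyRange 0 ((C.length : Int) - i2) 1).foldl (fun ans pc =>
                (PySem.List.pyRange 0 ((D.length : Int) - i2) 1).foldl (fun ans qd =>
                  if PySem.List.pyGetD A pa ' ' == PySem.List.pyGetD C pc ' '
                      && PySem.List.pyGetD A (pa + i1) ' ' == PySem.List.pyGetD D qd ' '
                      && PySem.List.pyGetD B qb ' ' == PySem.List.pyGetD C (pc + i2) ' '
                      && PySem.List.pyGetD B (qb + i1) ' ' == PySem.List.pyGetD D (qd + i2) ' '
                  then ans + 1 else ans) ans) ans) ans) ans) ans) ans
    else ans) 0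

-- ===== PRECONDITION & SPEC =====
-- Pre_: Python A unpacks each permutation as a,b,c,d, raising ValueError unless words has exactly 4 elements.
def Pre_crosswordFormation (words : List String) : Prop := words.length = 4
instance (words : List String) : Decidable (Pre_crosswordFormation words) := by
  unfold Pre_crosswordFormation; infer_instance
def pvWitness_crosswordFormation : List String := ["aba", "bab", "aab", "bba"]
def Spec_crosswordFormation (words : List String) (out : Int) : Prop := out = crosswordFormation_alt words
instance (words : List String) (out : Int) : Decidable (Spec_crosswordFormation words out) := by
  unfold Spec_crosswordFormation; infer_instance

-- ===== CLAIM (what is proved, stated in full; the proofs are below) =====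
def Claim_equal_crosswordFormation : Prop := ∀ (words : List String), Dom_crosswordFormation words → Pre_crosswordFormation words → Spec_crosswordFormation words (crosswordFormation words)

-- ===== LEMMAS AND PROOFS =====

def pvKey (A B : List Char) (i p q : Int) : Char × Char × Char × Char :=
  (PySem.List.pyGetD A p ' ', PySem.List.pyGetD A (p + i) ' ',
   PySem.List.pyGetD B q ' ', PySem.List.pyGetD B (q + i) ' ')

def pvQuery (C D : List Char) (i p q : Int) : Char × Char × Char × Char :=
  (PySem.List.pyGetD C p ' ', PySem.List.pyGetD D q ' ',
   PySem.List.pyGetD C (p + i) ' ', PySem.List.pyGetD D (q + i) ' ')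

def pvKeys (A B : List Char) : List (Char × Char × Char × Char) :=
  (PySem.List.pyRange 2 (min (A.length : Int) (B.length : Int)) 1).flatMap fun i =>
    (PySem.List.pyRange 0 ((A.length : Int) - i) 1).flatMap fun p =>
      (PySem.List.pyRange 0 ((B.length : Int) - i) 1).map fun q => pvKey A B i p q

def pvQueries (C D : List Char) : List (Char × Char × Char × Char) :=
  (PySem.List.pyRange 2 (min (C.length : Int) (D.length : Int)) 1).flatMap fun i =>
    (PySem.List.pyRange 0 ((C.length : Int) - i) 1).flatMap fun p =>
      (PySem.List.pyRange 0 ((D.length : Int) - i) 1).map fun q => pvQuery C D i p q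

-- A's dict-building triple loop is the counter of pvKeys
lemma dict_eq (A B : List Char) :
    ((PySem.List.pyRange 2 (min (A.length : Int) (B.length : Int)) 1).foldl (fun M i =>
      (PySem.List.pyRange 0 ((A.length : Int) - i) 1).foldl (fun M p =>
        (PySem.List.pyRange 0 ((B.length : Int) - i) 1).foldl (fun M q =>
          M.modify (PySem.List.pyGetD A p ' ', PySem.List.pyGetD A (p + i) ' ',
                    PySem.List.pyGetD B q ' ', PySem.List.pyGetD B (q + i) ' ')
            0 (· + 1)) M) M) (PySem.Dict.empty : PySem.Dict (Char × Char × Char × Char) Int))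
    = (pvKeys A B).foldl (fun M k => M.modify k 0 (· + 1)) PySem.Dict.empty := by
  simp only [pvKeys, pvKey, List.foldl_flatMap, List.foldl_map]

-- sum-swap for Int-valued double sums over lists
lemma sum_swap_int {α β : Type} (K : List α) (Q : List β) (f : α → β → Int) :
    (Q.map (fun q => (K.map (fun k => f k q)).sum)).sum
      = (K.map (fun k => (Q.map (fun q => f k q)).sum)).sum := by
  induction K with
  | nil => simp
  | cons h t ih => simp [List.sum_map_add, ← ih]

-- per-query: count = 0/1-sum over keys
lemma count_eq_sum (K : List (Char × Char × Char × Char)) (q : Char × Char × Char × Char) :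
    ((K.count q : Int)) = (K.map (fun k => if k = q then (1 : Int) else 0)).sum := by
  rw [List.count_eq_countP (l := K)]
  rw [← PySem.List.sum_map_ite_one_zero (fun k => k == q) K]
  simp


-- body of the indicator sum re-associated into Python's "if: ans += 1" fold step
lemma body_eq (k : Char × Char × Char × Char) (x1 x2 x3 x4 : Char) (ans : Int) :
    (ans + if k = (x1, x2, x3, x4) then (1 : Int) else 0)
      = if k.1 == x1 && k.2.1 == x2 && k.2.2.1 == x3 && k.2.2.2 == x4 then ans + 1 else ans := by
  obtain ⟨a, b, c, d⟩ := k
  simp only [Prod.mk.injEq, Bool.and_eq_true, beq_iff_eq]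
  split_ifs <;> simp_all

-- B's inner three loops for a fixed key k
lemma inner3 (C D : List Char) (k : Char × Char × Char × Char) (ans : Int) :
    (PySem.List.pyRange 2 (min (C.length : Int) (D.length : Int)) 1).foldl (fun ans i2 =>
      (PySem.List.pyRange 0 ((C.length : Int) - i2) 1).foldl (fun ans pc =>
        (PySem.List.pyRange 0 ((D.length : Int) - i2) 1).foldl (fun ans qd =>
          if k.1 == PySem.List.pyGetD C pc ' '
              && k.2.1 == PySem.List.pyGetD D qd ' '
              && k.2.2.1 == PySem.List.pyGetD C (pc + i2) ' '
              && k.2.2.2 == PySem.List.pyGetD D (qd + i2) ' '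
          then ans + 1 else ans) ans) ans) ans
    = ans + ((pvQueries C D).map (fun q => if k = q then (1 : Int) else 0)).sum := by
  rw [← PySem.List.foldl_add]
  simp only [pvQueries, pvQuery, List.foldl_flatMap, List.foldl_map, body_eq]

-- B's per-permutation contribution
lemma B_perm (A B C D : List Char) (ans : Int) :
    (PySem.List.pyRange 2 (min (A.length : Int) (B.length : Int)) 1).foldl (fun ans i1 =>
      (PySem.List.pyRange 0 ((A.length : Int) - i1) 1).foldl (fun ans pa =>
        (PySem.List.pyRange 0 ((B.length : Int) - i1) 1).foldl (fun ans qb =>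
          (PySem.List.pyRange 2 (min (C.length : Int) (D.length : Int)) 1).foldl (fun ans i2 =>
            (PySem.List.pyRange 0 ((C.length : Int) - i2) 1).foldl (fun ans pc =>
              (PySem.List.pyRange 0 ((D.length : Int) - i2) 1).foldl (fun ans qd =>
                if PySem.List.pyGetD A pa ' ' == PySem.List.pyGetD C pc ' '
                    && PySem.List.pyGetD A (pa + i1) ' ' == PySem.List.pyGetD D qd ' '
                    && PySem.List.pyGetD B qb ' ' == PySem.List.pyGetD C (pc + i2) ' '
                    && PySem.List.pyGetD B (qb + i1) ' ' == PySem.List.pyGetD D (qd + i2) ' '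
                then ans + 1 else ans) ans) ans) ans) ans) ans) ans
    = ans + ((pvKeys A B).map (fun k =>
        ((pvQueries C D).map (fun q => if k = q then (1 : Int) else 0)).sum)).sum := by
  rw [← PySem.List.foldl_add]
  simp only [pvKeys, pvKey, List.foldl_flatMap, List.foldl_map, ← inner3]

-- A's per-permutation contribution
lemma A_perm (A B C D : List Char) (ans : Int) :
    (PySem.List.pyRange 2 (min (C.length : Int) (D.length : Int)) 1).foldl (fun ans i =>
      (PySem.List.pyRange 0 ((C.length : Int) - i) 1).foldl (fun ans p =>
        (PySem.List.pyRange 0 ((D.length : Int) - i) 1).foldl (fun ans q =>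
          ans + ((PySem.List.pyRange 2 (min (A.length : Int) (B.length : Int)) 1).foldl (fun M i =>
            (PySem.List.pyRange 0 ((A.length : Int) - i) 1).foldl (fun M p =>
              (PySem.List.pyRange 0 ((B.length : Int) - i) 1).foldl (fun M q =>
                M.modify (PySem.List.pyGetD A p ' ', PySem.List.pyGetD A (p + i) ' ',
                          PySem.List.pyGetD B q ' ', PySem.List.pyGetD B (q + i) ' ')
                  0 (· + 1)) M) M) (PySem.Dict.empty : PySem.Dict (Char × Char × Char × Char) Int)).getD
              (PySem.List.pyGetD C p ' ', PySem.List.pyGetD D q ' ',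
               PySem.List.pyGetD C (p + i) ' ', PySem.List.pyGetD D (q + i) ' ') 0)
          ans) ans) ans
    = ans + ((pvQueries C D).map (fun q => ((pvKeys A B).count q : Int))).sum := by
  rw [dict_eq, ← PySem.List.foldl_add]
  simp only [pvQueries, pvQuery, List.foldl_flatMap, List.foldl_map,
    PySem.Dict.getD_foldl_modify_add_one, PySem.Dict.getD_empty, zero_add]

-- the hash-join sum equals the brute-force double sum
lemma join_eq (A B C D : List Char) :
    ((pvQueries C D).map (fun q => ((pvKeys A B).count q : Int))).sum
      = ((pvKeys A B).map (fun k =>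
          ((pvQueries C D).map (fun q => if k = q then (1 : Int) else 0)).sum)).sum := by
  simp only [count_eq_sum]
  exact sum_swap_int (pvKeys A B) (pvQueries C D) _

-- the two per-permutation fold bodies, named for the induction
def pvBodyA : Int → List String → Int := fun ans p =>
    match p with
    | [a, b, c, d] =>
      let A := a.toList; let B := b.toList; let C := c.toList; let D := d.toList
      let M : PySem.Dict (Char × Char × Char × Char) Int :=
        (PySem.List.pyRange 2 (min (A.length : Int) (B.length : Int)) 1).foldl (fun M i =>
          (PySem.List.pyRange 0 ((A.length : Int) - i) 1).foldl (fun M p =>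
            (PySem.List.pyRange 0 ((B.length : Int) - i) 1).foldl (fun M q =>
              M.modify (PySem.List.pyGetD A p ' ', PySem.List.pyGetD A (p + i) ' ',
                        PySem.List.pyGetD B q ' ', PySem.List.pyGetD B (q + i) ' ')
                0 (· + 1)) M) M) PySem.Dict.empty
      (PySem.List.pyRange 2 (min (C.length : Int) (D.length : Int)) 1).foldl (fun ans i =>
        (PySem.List.pyRange 0 ((C.length : Int) - i) 1).foldl (fun ans p =>
          (PySem.List.pyRange 0 ((D.length : Int) - i) 1).foldl (fun ans q =>
            ans + M.getD (PySem.List.pyGetD C p ' ', PySem.List.pyGetD D q ' ',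
                          PySem.List.pyGetD C (p + i) ' ', PySem.List.pyGetD D (q + i) ' ') 0)
            ans) ans) ans
    | _ => ans

def pvBodyB : Int → List String → Int := fun ans p =>
    if p.length == 4 then
      let A := (p.getD 0 "").toList; let B := (p.getD 1 "").toList
      let C := (p.getD 2 "").toList; let D := (p.getD 3 "").toList
      (PySem.List.pyRange 2 (min (A.length : Int) (B.length : Int)) 1).foldl (fun ans i1 =>
        (PySem.List.pyRange 0 ((A.length : Int) - i1) 1).foldl (fun ans pa =>
          (PySem.List.pyRange 0 ((B.length : Int) - i1) 1).foldl (fun ans qb =>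
            (PySem.List.pyRange 2 (min (C.length : Int) (D.length : Int)) 1).foldl (fun ans i2 =>
              (PySem.List.pyRange 0 ((C.length : Int) - i2) 1).foldl (fun ans pc =>
                (PySem.List.pyRange 0 ((D.length : Int) - i2) 1).foldl (fun ans qd =>
                  if PySem.List.pyGetD A pa ' ' == PySem.List.pyGetD C pc ' '
                      && PySem.List.pyGetD A (pa + i1) ' ' == PySem.List.pyGetD D qd ' '
                      && PySem.List.pyGetD B qb ' ' == PySem.List.pyGetD C (pc + i2) ' '
                      && PySem.List.pyGetD B (qb + i1) ' ' == PySem.List.pyGetD D (qd + i2) ' '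
                  then ans + 1 else ans) ans) ans) ans) ans) ans) ans
    else ans

lemma body_perm (ans : Int) (p : List String) : pvBodyA ans p = pvBodyB ans p := by
  rcases p with _ | ⟨a, _ | ⟨b, _ | ⟨c, _ | ⟨d, _ | ⟨e, r⟩⟩⟩⟩⟩
  · rfl
  · rfl
  · rfl
  · rfl
  · have h4 : (([a, b, c, d] : List String).length == 4) = true := by simp
    simp only [pvBodyA, pvBodyB, h4, if_true, List.getD, List.getElem?_cons_zero,
      List.getElem?_cons_succ, Option.getD_some, A_perm, join_eq]
    exact (B_perm a.toList b.toList c.toList d.toList ans).symm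
  · have h5 : ((a :: b :: c :: d :: e :: r : List String).length == 4) = false := by
      rw [beq_eq_false_iff_ne]; simp
    simp only [pvBodyA, pvBodyB, h5, Bool.false_eq_true, if_false]

lemma fold_eq (l : List (List String)) (ans : Int) :
    l.foldl pvBodyA ans = l.foldl pvBodyB ans := by
  induction l generalizing ans with
  | nil => rfl
  | cons p t ih => simp only [List.foldl_cons, body_perm, ih]

theorem crosswordFormation_spec : Claim_equal_crosswordFormation := by
  intro words _ _
  show crosswordFormation words = crosswordFormation_alt words
  show (PySem.List.permutations words words.length).foldl pvBodyA 0
      = (PySem.List.permutations words words.length).foldl pvBodyB 0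
  exact fold_eq _ 0
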